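-- pv_equiv track=rewrite | github.com/WhalerMike/uiao | src/uiao/adapters/modernization/active_directory/survey.py | resolve_manager_chain
-- ===== SOURCE A (Python) =====
-- from typing import Optional
--
-- def resolve_manager_chain(
--     user_dn: str,
--     all_objects: dict[str, dict],
--     visited: Optional[set[str]] = None,
-- ) -> tuple[list[str], bool]:
--     """
--     Walk the manager chain from *user_dn* up to the root or a cycle.
--
--     Parameters
--     ----------
--     user_dn     : DN of the user whose manager chain we are resolving.
--     all_objects : flat index of DN → object dict; each object may have a
--                   ``"manager"`` key containing a single manager DN string.
--     visited     : set of DNs already on the current chain (cycle guard).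
--
--     Returns
--     -------
--     (chain, cycle_detected)
--         chain          — ordered list of manager DNs (immediate manager first).
--         cycle_detected — True if the chain looped back to a previously seen DN.
--     """
--     if visited is None:
--         visited = set()
--
--     obj = all_objects.get(user_dn)
--     if obj is None:
--         return [], False
--
--     manager_dn: Optional[str] = obj.get("manager")
--     if not manager_dn:
--         return [], False
--
--     if manager_dn in visited:
--         return [manager_dn], True  # cycle
--
--     chain, cycle = resolve_manager_chain(manager_dn, all_objects, visited | {user_dn})
--     return [manager_dn, *chain], cycle
-- ===== SOURCE B (Python) =====
-- from typing import Optional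
--
-- def resolve_manager_chain(
--     user_dn: str,
--     all_objects: dict[str, dict],
--     visited: Optional[set[str]] = None,
-- ) -> tuple[list[str], bool]:
--     """Option-driven iterative walk: a next_manager helper collapses the two
--     lookups + falsiness test, and one loop follows it until None or a seen DN."""
--     def next_manager(dn: str) -> Optional[str]:
--         obj = all_objects.get(dn)
--         if obj is None:
--             return None
--         return obj.get("manager") or None
--
--     seen = set(visited) if visited else set()
--     chain: list[str] = []
--     prev = user_dn
--     m = next_manager(user_dn)
--     while m is not None and m not in seen:
--         chain.append(m)
--         seen.add(prev)
--         prev, m = m, next_manager(m)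
--     if m is None:
--         return chain, False
--     chain.append(m)
--     return chain, True
-- ===== Notes on version B (the rewrite author's own statement) =====
-- stated objective: alternative
-- what changed: Replaced A's recursive descent (which copies the visited set with '|' and rebuilds the chain by prepending at every level) with a next_manager helper collapsing the two dict lookups and falsiness test into one Optional, plus a single option-driven loop that mutates one seen set and appends to one chain list.
import Mathlib
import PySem

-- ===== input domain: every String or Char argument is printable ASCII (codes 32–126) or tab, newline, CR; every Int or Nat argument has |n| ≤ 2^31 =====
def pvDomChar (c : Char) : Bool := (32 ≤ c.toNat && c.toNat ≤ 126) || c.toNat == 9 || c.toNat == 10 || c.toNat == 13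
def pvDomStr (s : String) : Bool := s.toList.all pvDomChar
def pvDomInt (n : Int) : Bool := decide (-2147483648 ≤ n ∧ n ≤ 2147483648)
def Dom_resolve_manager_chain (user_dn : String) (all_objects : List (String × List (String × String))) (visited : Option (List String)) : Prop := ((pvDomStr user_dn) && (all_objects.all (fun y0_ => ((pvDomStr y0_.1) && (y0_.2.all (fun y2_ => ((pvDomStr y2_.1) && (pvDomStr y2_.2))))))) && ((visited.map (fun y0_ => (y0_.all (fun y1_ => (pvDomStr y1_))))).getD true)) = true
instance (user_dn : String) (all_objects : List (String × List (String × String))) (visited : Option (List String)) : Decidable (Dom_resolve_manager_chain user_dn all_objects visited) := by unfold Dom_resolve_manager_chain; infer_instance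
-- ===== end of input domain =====

-- B replaces A's recursive descent with a next_manager helper (missing object / missing or
-- falsy manager collapsed into one Option) and a single option-driven loop appending to one
-- chain; objective: alternative (avoids per-level set copying; speed not measured).


-- ===== PORT A =====
-- A's recursion is bounded by fuel = all_objects.length + 2, which the recursion never
-- exhausts (each continuing step adds one new key to visited); fuel is only a totality
-- guard, not an algorithm change.
def resolve_manager_chain_go (fuel : Nat) (user_dn : String)
    (all_objects : List (String × List (String × String))) (visited : List String) :
    List String × Bool :=
  match fuel with
  | 0 => ([], false)
  | fuel + 1 =>
    match (PySem.Dict.mk all_objects).get? user_dn with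
    | none => ([], false)
    | some obj =>
      match (PySem.Dict.mk obj).get? "manager" with
      | none => ([], false)
      | some manager_dn =>
        if manager_dn = "" then ([], false)
        else if PySem.Set.contains visited manager_dn then ([manager_dn], true)
        else
          let r := resolve_manager_chain_go fuel manager_dn all_objects
                     (PySem.Set.add visited user_dn)
          (manager_dn :: r.1, r.2)

def resolve_manager_chain (user_dn : String) (all_objects : List (String × List (String × String))) (visited : Option (List String)) : List String × Bool :=
  resolve_manager_chain_go (all_objects.length + 2) user_dn all_objects (visited.getD [])

-- ===== PORT B =====
-- B's next_manager: all_objects.get(dn) then obj.get("manager") or None, one Option result.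
def resolve_manager_chain_nm (all_objects : List (String × List (String × String)))
    (dn : String) : Option String :=
  match (PySem.Dict.mk all_objects).get? dn with
  | none => none
  | some obj =>
    match (PySem.Dict.mk obj).get? "manager" with
    | none => none
    | some m => if m = "" then none else some m

-- B's `while m is not None and m not in seen` loop, ported as tail recursion on the same
-- fuel bound (the loop body runs at most once per distinct key, so fuel is never exhausted).
def resolve_manager_chain_alt_go (fuel : Nat)
    (all_objects : List (String × List (String × String)))
    (seen chain : List String) (prev : String) (m? : Option String) :
    List String × Bool :=
  match fuel, m? with
  | _, none => (chain, false)
  | 0, some _ => (chain, false)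
  | fuel + 1, some m =>
    if PySem.Set.contains seen m then (chain ++ [m], true)
    else resolve_manager_chain_alt_go fuel all_objects (PySem.Set.add seen prev)
           (chain ++ [m]) m (resolve_manager_chain_nm all_objects m)

def resolve_manager_chain_alt (user_dn : String) (all_objects : List (String × List (String × String))) (visited : Option (List String)) : List String × Bool :=
  resolve_manager_chain_alt_go (all_objects.length + 2) all_objects
    (PySem.Set.ofList (visited.getD [])) [] user_dn
    (resolve_manager_chain_nm all_objects user_dn)

-- ===== PRECONDITION & SPEC =====
def Spec_resolve_manager_chain (user_dn : String) (all_objects : List (String × List (String × String))) (visited : Option (List String)) (out : List String × Bool) : Prop := out = resolve_manager_chain_alt user_dn all_objects visited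
instance (user_dn : String) (all_objects : List (String × List (String × String))) (visited : Option (List String)) (out : List String × Bool) : Decidable (Spec_resolve_manager_chain user_dn all_objects visited out) := by unfold Spec_resolve_manager_chain; infer_instance

-- ===== CLAIM (what is proved, stated in full; the proofs are below) =====
def Claim_equal_resolve_manager_chain : Prop := ∀ (user_dn : String) (all_objects : List (String × List (String × String))) (visited : Option (List String)), Dom_resolve_manager_chain user_dn all_objects visited → Spec_resolve_manager_chain user_dn all_objects visited (resolve_manager_chain user_dn all_objects visited)

-- ===== LEMMAS AND PROOFS =====

-- Loop invariant: B's loop, started at u's next manager with accumulator `chain` and a seen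
-- set with the same membership as A's visited set, computes `chain ++ A's chain` with A's flag.
theorem go_agree (ao : List (String × List (String × String))) :
    ∀ (fuel : Nat) (u : String) (v w acc : List String),
    (∀ x, x ∈ v ↔ x ∈ w) →
    resolve_manager_chain_alt_go fuel ao w acc u (resolve_manager_chain_nm ao u)
      = (acc ++ (resolve_manager_chain_go fuel u ao v).1,
         (resolve_manager_chain_go fuel u ao v).2) := by
  intro fuel
  induction fuel with
  | zero =>
    intro u v w acc h
    cases hnm : resolve_manager_chain_nm ao u <;>
      simp [resolve_manager_chain_go, resolve_manager_chain_alt_go]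
  | succ n ih =>
    intro u v w acc h
    simp only [resolve_manager_chain_go]
    cases hobj : (PySem.Dict.mk ao).get? u with
    | none =>
      simp [resolve_manager_chain_alt_go, resolve_manager_chain_nm, hobj]
    | some obj =>
      cases hm : (PySem.Dict.mk obj).get? "manager" with
      | none =>
        simp [resolve_manager_chain_alt_go, resolve_manager_chain_nm, hobj, hm]
      | some m =>
        by_cases he : m = ""
        · simp [resolve_manager_chain_alt_go, resolve_manager_chain_nm, hobj, hm, he]
        · have hnm : resolve_manager_chain_nm ao u = some m := by
            simp [resolve_manager_chain_nm, hobj, hm, he]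
          by_cases hmv : m ∈ v
          · have hmw : m ∈ w := (h m).mp hmv
            simp [resolve_manager_chain_alt_go, hnm, hm, he, hmv, hmw]
          · have hmw : m ∉ w := fun hx => hmv ((h m).mpr hx)
            have h' : ∀ x, x ∈ PySem.Set.add v u ↔ x ∈ PySem.Set.add w u := by
              intro x; simp [PySem.Set.mem_add, h x]
            simp [resolve_manager_chain_alt_go, hnm, hm, he, hmv, hmw,
              ih m (PySem.Set.add v u) (PySem.Set.add w u) (acc ++ [m]) h']

-- ===== VERDICT (by name: the statement is the Claim_ definition above) =====
theorem resolve_manager_chain_spec : Claim_equal_resolve_manager_chain := by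
  intro u ao vis _
  unfold Spec_resolve_manager_chain resolve_manager_chain resolve_manager_chain_alt
  rw [go_agree ao (ao.length + 2) u (vis.getD []) (PySem.Set.ofList (vis.getD [])) []
      (by intro x; simp [PySem.Set.mem_ofList])]
  simp
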